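-- pv_equiv track=rewrite | github.com/jonassjovaag/CCM4 | agent/harmonic_translator.py | _constrain_to_voice_range
-- ===== SOURCE A (Python) =====
-- def _constrain_to_voice_range(note: int, voice_type: str) -> int:
--     """
--     Constrain MIDI note to appropriate voice range
--
--     Prevents extreme octave jumps from interval application
--
--     Args:
--         note: MIDI note number
--         voice_type: "melodic" or "bass"
--
--     Returns:
--         MIDI note constrained to voice range
--     """
--     if voice_type == "melodic":
--         # Melody: C4-C6 (MIDI 60-84)
--         min_note, max_note = 60, 84
--     else:
--         # Bass: C2-C4 (MIDI 36-60)
--         min_note, max_note = 36, 60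
--
--     # Wrap to range using octave shifts
--     while note < min_note:
--         note += 12
--     while note > max_note:
--         note -= 12
--
--     # Final clamping (safety)
--     return max(min_note, min(note, max_note))
-- ===== SOURCE B (Python) =====
-- def _constrain_to_voice_range(note: int, voice_type: str) -> int:
--     """Closed-form octave wrap into the voice range (no loops)."""
--     if voice_type == "melodic":
--         min_note, max_note = 60, 84
--     else:
--         min_note, max_note = 36, 60
--     if note < min_note:
--         return min_note + (note - min_note) % 12
--     if note > max_note:
--         return max_note - (max_note - note) % 12
--     return note
-- ===== Notes on version B (the rewrite author's own statement) =====
-- stated objective: simpler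
-- what changed: Replaced the two octave-shift while loops plus the final clamp by a three-way closed form using Python's non-negative modulo.
import Mathlib
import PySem

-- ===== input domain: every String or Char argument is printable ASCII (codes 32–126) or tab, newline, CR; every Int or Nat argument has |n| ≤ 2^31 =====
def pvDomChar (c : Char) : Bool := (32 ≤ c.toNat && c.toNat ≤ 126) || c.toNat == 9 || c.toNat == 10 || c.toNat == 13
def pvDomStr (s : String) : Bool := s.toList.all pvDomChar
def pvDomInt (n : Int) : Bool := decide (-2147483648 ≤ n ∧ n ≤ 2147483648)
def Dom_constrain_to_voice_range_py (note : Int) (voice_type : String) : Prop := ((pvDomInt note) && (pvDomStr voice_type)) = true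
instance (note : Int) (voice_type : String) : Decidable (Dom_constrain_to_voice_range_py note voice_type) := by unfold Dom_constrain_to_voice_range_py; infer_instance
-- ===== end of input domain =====

-- B replaces A's two octave-shift while loops and final clamp by a three-way closed form (simpler).

-- ===== PORT A =====
-- 'while note < min_note: note += 12'
def pvWrapUp (min_note : Int) (note : Int) : Int :=
  if note < min_note then pvWrapUp min_note (note + 12) else note
termination_by (min_note - note).toNat
decreasing_by omega

-- 'while note > max_note: note -= 12'
def pvWrapDown (max_note : Int) (note : Int) : Int :=
  if note > max_note then pvWrapDown max_note (note - 12) else note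
termination_by (note - max_note).toNat
decreasing_by omega

def constrain_to_voice_range_py (note : Int) (voice_type : String) : Int :=
  let p := if voice_type = "melodic" then ((60 : Int), (84 : Int)) else ((36 : Int), (60 : Int))
  let n1 := pvWrapUp p.1 note
  let n2 := pvWrapDown p.2 n1
  max p.1 (min n2 p.2)

-- ===== PORT B =====
def constrain_to_voice_range_py_alt (note : Int) (voice_type : String) : Int :=
  let p := if voice_type = "melodic" then ((60 : Int), (84 : Int)) else ((36 : Int), (60 : Int))
  if note < p.1 then p.1 + PySem.Int.mod (note - p.1) 12
  else if note > p.2 then p.2 - PySem.Int.mod (p.2 - note) 12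
  else note

-- ===== PRECONDITION & SPEC =====
def Spec_constrain_to_voice_range_py (note : Int) (voice_type : String) (out : Int) : Prop := out = constrain_to_voice_range_py_alt note voice_type
instance (note : Int) (voice_type : String) (out : Int) : Decidable (Spec_constrain_to_voice_range_py note voice_type out) := by unfold Spec_constrain_to_voice_range_py; infer_instance

-- ===== CLAIM (what is proved, stated in full; the proofs are below) =====
def Claim_equal_constrain_to_voice_range_py : Prop := ∀ (note : Int) (voice_type : String), Dom_constrain_to_voice_range_py note voice_type → Spec_constrain_to_voice_range_py note voice_type (constrain_to_voice_range_py note voice_type)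

-- ===== LEMMAS AND PROOFS =====

theorem pvWrapUp_eq (min_note note : Int) :
    pvWrapUp min_note note = if note < min_note then min_note + (note - min_note) % 12 else note := by
  by_cases h : note < min_note
  · rw [pvWrapUp]
    simp only [h, if_true]
    rw [pvWrapUp_eq min_note (note + 12)]
    by_cases h2 : note + 12 < min_note
    · simp only [h2, if_true]
      have : (note + 12 - min_note) % 12 = (note - min_note) % 12 := by omega
      omega
    · simp only [h2, if_false]
      omega
  · rw [pvWrapUp]; simp [h]
termination_by (min_note - note).toNat
decreasing_by omega

theorem pvWrapDown_eq (max_note note : Int) :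
    pvWrapDown max_note note = if note > max_note then max_note - (max_note - note) % 12 else note := by
  by_cases h : note > max_note
  · rw [pvWrapDown]
    simp only [h, if_true]
    rw [pvWrapDown_eq max_note (note - 12)]
    by_cases h2 : note - 12 > max_note
    · simp only [h2, if_true]
      have : (max_note - (note - 12)) % 12 = (max_note - note) % 12 := by omega
      omega
    · simp only [h2, if_false]
      omega
  · rw [pvWrapDown]; simp [h]
termination_by (note - max_note).toNat
decreasing_by omega

theorem wrap_core (lo hi note : Int) (hw : lo + 11 ≤ hi) :
    max lo (min (pvWrapDown hi (pvWrapUp lo note)) hi) =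
      if note < lo then lo + PySem.Int.mod (note - lo) 12
      else if note > hi then hi - PySem.Int.mod (hi - note) 12
      else note := by
  rw [pvWrapUp_eq]
  have hm : PySem.Int.mod (note - lo) 12 = (note - lo) % 12 :=
    PySem.Int.mod_eq_emod_of_pos (by norm_num)
  have hm2 : PySem.Int.mod (hi - note) 12 = (hi - note) % 12 :=
    PySem.Int.mod_eq_emod_of_pos (by norm_num)
  by_cases h : note < lo
  · simp only [h, if_true]
    have h1 : 0 ≤ (note - lo) % 12 := Int.emod_nonneg _ (by norm_num)
    have h2 : (note - lo) % 12 < 12 := Int.emod_lt_of_pos _ (by norm_num)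
    rw [pvWrapDown_eq]
    have : ¬ (lo + (note - lo) % 12 > hi) := by omega
    simp only [this, if_false, hm]
    omega
  · simp only [h, if_false]
    rw [pvWrapDown_eq]
    by_cases h3 : note > hi
    · simp only [h3, if_true, hm2]
      have h1 : 0 ≤ (hi - note) % 12 := Int.emod_nonneg _ (by norm_num)
      have h2 : (hi - note) % 12 < 12 := Int.emod_lt_of_pos _ (by norm_num)
      have : (hi - note) % 12 = -((note - hi) % 12) % 12 := by omega
      omega
    · simp only [h3, if_false]
      omega

-- ===== VERDICT (by name: the statement is the Claim_ definition above) =====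
theorem constrain_to_voice_range_py_spec : Claim_equal_constrain_to_voice_range_py := by
  intro note voice_type _
  unfold Spec_constrain_to_voice_range_py constrain_to_voice_range_py constrain_to_voice_range_py_alt
  by_cases hv : voice_type = "melodic" <;>
    simp only [hv, if_true, if_false] <;>
    exact wrap_core _ _ note (by norm_num)
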